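-- pv_equiv track=rewrite | github.com/DerivedFunction01/xlm-roberta-sent-nlp | split_wrapped_sentence_caches.py | _merge_sentence_fragments
-- ===== SOURCE A (Python) =====
-- def _merge_sentence_fragments(fragments: list[str]) -> list[str]:
--     if not fragments:
--         return []
--
--     merged: list[str] = []
--     for fragment in fragments:
--         fragment = fragment.strip()
--         if not fragment:
--             continue
--         if not merged:
--             merged.append(fragment)
--             continue
--
--         prev = merged[-1]
--         prev_words = len(prev.split())
--         next_starts_lower = fragment[:1].islower()
--         prev_looks_short = prev_words < 4 or prev.endswith((" .", " :", " ;"))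
--         if prev_looks_short and next_starts_lower:
--             merged[-1] = f"{prev} {fragment}".strip()
--             continue
--         merged.append(fragment)
--
--     return merged
-- ===== SOURCE B (Python) =====
-- _TAILS = (" .", " :", " ;")
--
-- def _merge_sentence_fragments(fragments: list[str]) -> list[str]:
--     # Stage 1: strip every fragment and drop the empty ones.
--     cleaned = [s for s in (f.strip() for f in fragments) if s]
--     # Stage 2: group consecutive fragments into sentences; a sentence under
--     # construction is a LIST of fragments (joined once at the end), and its
--     # trailing-end flag is read off the last fragment alone; each sentence is
--     # joined exactly once.
--     out: list[str] = []
--     i, n = 0, len(cleaned)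
--     while i < n:
--         first = cleaned[i]
--         group = [first]
--         words = len(first.split())
--         open_tail = first.endswith(_TAILS)
--         i += 1
--         while i < n and (words < 4 or open_tail) and cleaned[i][:1].islower():
--             f = cleaned[i]
--             group.append(f)
--             words += len(f.split())
--             # after joining with a single space, the sentence ends with " ." etc.
--             # exactly when f does, or f is itself one of ".", ":", ";"
--             open_tail = f.endswith(_TAILS) or f in (".", ":", ";")
--             i += 1
--         out.append(" ".join(group))
--     return out
-- ===== Notes on version B (the rewrite author's own statement) =====
-- stated objective: alternative
-- what changed: B first strips/filters all fragments in one pass, then groups consecutive fragments into sentences with a scan that tracks a running word count and a trailing-end flag read off the last fragment alone, joining each group once at the end, instead of A's fold that rewrites merged[-1] and re-splits/re-concatenates the growing sentence on every fragment.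
import Mathlib
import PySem

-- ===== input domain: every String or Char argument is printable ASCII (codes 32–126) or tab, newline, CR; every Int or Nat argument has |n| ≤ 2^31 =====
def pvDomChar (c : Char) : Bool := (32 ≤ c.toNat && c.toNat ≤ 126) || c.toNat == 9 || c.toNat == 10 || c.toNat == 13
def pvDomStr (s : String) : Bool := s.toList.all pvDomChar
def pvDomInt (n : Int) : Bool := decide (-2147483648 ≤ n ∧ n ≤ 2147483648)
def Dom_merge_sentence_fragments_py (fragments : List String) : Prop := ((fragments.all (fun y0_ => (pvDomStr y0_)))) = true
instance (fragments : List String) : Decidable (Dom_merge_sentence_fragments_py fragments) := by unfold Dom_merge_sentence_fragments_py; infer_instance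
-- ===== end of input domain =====

-- B stages the work: strip/filter once, then group consecutive fragments into sentences keeping a
-- running word count and a trailing-end flag from the last fragment only, joining each group once
-- at the end instead of rewriting and re-splitting merged[-1] (objective: alternative).

-- str.islower() — exact on the ASCII domain, where the cased characters are exactly the letters:
-- at least one lowercase letter and no uppercase letter. (Shared by both ports.)
def pyStrIslower (s : String) : Bool :=
  s.toList.any PySem.Chars.islower && s.toList.all (fun c => !(PySem.Chars.isupper c))

-- ===== PORT A =====
-- one iteration of A's for-loop (merged is Python's `merged` list, in order)
def pyAStep (merged : List String) (fragment : String) : List String :=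
  let fragment := PySem.Str.strip fragment
  if fragment == "" then merged
  else if merged.isEmpty then merged ++ [fragment]
  else
    let prev := merged.getLast!
    let prev_words := (PySem.Str.split₀ prev).length
    let next_starts_lower := pyStrIslower (PySem.Str.slice fragment none (some 1))
    let prev_looks_short := decide (prev_words < 4) ||
      (PySem.Str.endswith prev " ." || PySem.Str.endswith prev " :" || PySem.Str.endswith prev " ;")
    if prev_looks_short && next_starts_lower then
      merged.dropLast ++ [PySem.Str.strip (prev ++ " " ++ fragment)]
    else merged ++ [fragment]

def merge_sentence_fragments_py (fragments : List String) : List String :=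
  if fragments.isEmpty then [] else fragments.foldl pyAStep []

-- ===== PORT B =====
-- s.endswith((" .", " :", " ;")) — Python's tuple endswith is the disjunction
def bTailFlag (s : String) : Bool :=
  PySem.Str.endswith s " ." || PySem.Str.endswith s " :" || PySem.Str.endswith s " ;"

-- the inner while loop: consume the fragments that attach to the sentence under construction,
-- given its running word count and trailing-end flag; returns (group tail, remaining fragments)
def bConsume : List String → Nat → Bool → List String × List String
  | [], _, _ => ([], [])
  | f :: rest, words, openTail =>
    if (decide (words < 4) || openTail) && pyStrIslower (PySem.Str.slice f none (some 1)) then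
      let p := bConsume rest (words + (PySem.Str.split₀ f).length)
        (bTailFlag f || (f == "." || f == ":" || f == ";"))
      (f :: p.1, p.2)
    else ([], f :: rest)

-- needed by bOuter's termination proof
theorem bConsume_rest_len (L : List String) (w : Nat) (t : Bool) :
    (bConsume L w t).2.length ≤ L.length := by
  induction L generalizing w t with
  | nil => simp [bConsume]
  | cons f rest ih =>
    unfold bConsume
    split
    · exact le_trans (ih _ _) (by simp)
    · simp

-- the outer while loop over the cleaned fragments
def bOuter : List String → List String
  | [] => []
  | f :: rest =>
    let p := bConsume rest (PySem.Str.split₀ f).length (bTailFlag f)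
    PySem.Str.join " " (f :: p.1) :: bOuter p.2
  termination_by L => L.length
  decreasing_by
    have := bConsume_rest_len rest (PySem.Str.split₀ f).length (bTailFlag f)
    simp only [List.length_cons]
    omega

def merge_sentence_fragments_py_alt (fragments : List String) : List String :=
  bOuter ((fragments.map PySem.Str.strip).filter (fun s => !(s == "")))

-- ===== PRECONDITION & SPEC =====
def Spec_merge_sentence_fragments_py (fragments : List String) (out : List String) : Prop := out = merge_sentence_fragments_py_alt fragments
instance (fragments : List String) (out : List String) : Decidable (Spec_merge_sentence_fragments_py fragments out) := by unfold Spec_merge_sentence_fragments_py; infer_instance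

-- ===== CLAIM (what is proved, stated in full; the proofs are below) =====
def Claim_equal_merge_sentence_fragments_py : Prop := ∀ (fragments : List String), Dom_merge_sentence_fragments_py fragments → Spec_merge_sentence_fragments_py fragments (merge_sentence_fragments_py fragments)

-- ===== LEMMAS AND PROOFS =====

theorem go_nil (cur : List Char) (acc : List (List Char)) :
    PySem.Chars.split₀.go [] cur acc =
      if cur.isEmpty then acc.reverse else (cur.reverse :: acc).reverse := by
  rw [PySem.Chars.split₀.go]

theorem go_cons (c : Char) (rest cur : List Char) (acc : List (List Char)) :
    PySem.Chars.split₀.go (c :: rest) cur acc =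
      if PySem.Chars.isspace c then
        (if cur.isEmpty then PySem.Chars.split₀.go rest [] acc
         else PySem.Chars.split₀.go rest [] (cur.reverse :: acc))
      else PySem.Chars.split₀.go rest (c :: cur) acc := by
  rw [PySem.Chars.split₀.go]

-- split() on whitespace never lets a word span a space, so it distributes over `a ++ ' ' :: b`
theorem splitGo_acc (s cur : List Char) (acc : List (List Char)) :
    PySem.Chars.split₀.go s cur acc = acc.reverse ++ PySem.Chars.split₀.go s cur [] := by
  induction s generalizing cur acc with
  | nil =>
    rw [go_nil, go_nil]
    by_cases h : cur.isEmpty <;> simp [h]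
  | cons c rest ih =>
    rw [go_cons, go_cons]
    by_cases hs : PySem.Chars.isspace c
    · by_cases h : cur.isEmpty
      · rw [if_pos hs, if_pos hs, if_pos h, if_pos h, ih [] acc]
      · rw [if_pos hs, if_pos hs, if_neg h, if_neg h, ih [] (cur.reverse :: acc), ih [] [cur.reverse]]
        simp
    · rw [if_neg hs, if_neg hs, ih (c :: cur) acc]

theorem splitGo_space (a b cur : List Char) (acc : List (List Char)) :
    PySem.Chars.split₀.go (a ++ ' ' :: b) cur acc =
      PySem.Chars.split₀.go a cur acc ++ PySem.Chars.split₀.go b [] [] := by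
  induction a generalizing cur acc with
  | nil =>
    rw [List.nil_append, go_cons, go_nil]
    have hs : PySem.Chars.isspace ' ' = true := by decide
    rw [if_pos hs]
    by_cases h : cur.isEmpty
    · rw [if_pos h, if_pos h, splitGo_acc b [] acc]
    · rw [if_neg h, if_neg h, splitGo_acc b [] (cur.reverse :: acc)]
  | cons c rest ih =>
    rw [List.cons_append, go_cons, go_cons]
    by_cases hs : PySem.Chars.isspace c
    · by_cases h : cur.isEmpty
      · rw [if_pos hs, if_pos hs, if_pos h, if_pos h, ih]
      · rw [if_pos hs, if_pos hs, if_neg h, if_neg h, ih]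
    · rw [if_neg hs, if_neg hs, ih]

theorem split₀_append_space (a b : List Char) :
    PySem.Chars.split₀ (a ++ ' ' :: b) = PySem.Chars.split₀ a ++ PySem.Chars.split₀ b := by
  simpa [PySem.Chars.split₀] using splitGo_space a b [] []

-- heads/lasts of a stripped string are not whitespace
theorem strip_head_not_space (s : List Char) (c : Char) (rest : List Char)
    (h : PySem.Chars.strip s = c :: rest) : PySem.Chars.isspace c = false := by
  have h1 : PySem.Chars.lstrip (PySem.Chars.lstrip s) = PySem.Chars.lstrip s := by
    simp [PySem.Chars.lstrip, List.dropWhile_idempotent]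
  rcases hl : PySem.Chars.lstrip s with _ | ⟨d, ds⟩
  · simp [PySem.Chars.strip, hl, PySem.Chars.rstrip] at h
  · have hd : PySem.Chars.isspace d = false := by
      rw [hl] at h1
      by_contra hcon
      simp only [Bool.not_eq_false] at hcon
      simp [PySem.Chars.lstrip, hcon] at h1
      have := congrArg List.length h1
      simp at this
      have := List.length_dropWhile_le (p := PySem.Chars.isspace) ds
      omega
    have hpre : (PySem.Chars.strip s) <+: d :: ds := by
      simp only [PySem.Chars.strip, hl, PySem.Chars.rstrip]
      have hsuf : List.dropWhile PySem.Chars.isspace (d :: ds).reverse <:+ (d :: ds).reverse :=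
        List.dropWhile_suffix _
      have := List.reverse_prefix.mpr hsuf
      simpa using this
    rw [h] at hpre
    obtain ⟨t, ht⟩ := hpre
    have hcd : c = d := by
      have := congrArg (fun l => l.head?) ht
      simpa using this
    rwa [hcd]

theorem strip_last_not_space (s : List Char) (c : Char) (init : List Char)
    (h : PySem.Chars.strip s = init ++ [c]) : PySem.Chars.isspace c = false := by
  rcases hr : List.dropWhile PySem.Chars.isspace (PySem.Chars.lstrip s).reverse with _ | ⟨d, ds⟩
  · simp [PySem.Chars.strip, PySem.Chars.rstrip, hr] at h
  · have hd : PySem.Chars.isspace d = false := by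
      by_contra hcon
      simp only [Bool.not_eq_false] at hcon
      have h2 : List.dropWhile PySem.Chars.isspace (d :: ds) = d :: ds := by
        rw [← hr, List.dropWhile_idempotent]
      simp [hcon] at h2
      have := congrArg List.length h2
      simp at this
      have := List.length_dropWhile_le (p := PySem.Chars.isspace) ds
      omega
    have hst : PySem.Chars.strip s = (d :: ds).reverse := by
      simp [PySem.Chars.strip, PySem.Chars.rstrip, hr]
    rw [h] at hst
    have hc : c = d := by
      have := congrArg (fun l => l.getLast?) hst
      simpa using this
    rwa [hc]

-- a nonempty list with non-whitespace head and last is a fixed point of strip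
theorem strip_fixed (l : List Char) (hne : l ≠ [])
    (hh : PySem.Chars.isspace (l.head hne) = false)
    (hl : PySem.Chars.isspace (l.getLast hne) = false) :
    PySem.Chars.strip l = l := by
  have hls : PySem.Chars.lstrip l = l := by
    rcases l with _ | ⟨c, cs⟩
    · exact absurd rfl hne
    · simp only [List.head_cons] at hh
      simp [PySem.Chars.lstrip, hh]
  rw [PySem.Chars.strip, hls, PySem.Chars.rstrip]
  rcases he : l.reverse with _ | ⟨d, ds⟩
  · exact absurd (by simpa using congrArg List.reverse he) hne
  · have hd : d = l.getLast hne := by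
      have h1 : l.reverse.head? = some d := by rw [he]; rfl
      rw [List.head?_reverse, List.getLast?_eq_some_getLast hne] at h1
      exact (Option.some_inj.mp h1).symm
    have hds : PySem.Chars.isspace d = false := by rw [hd]; exact hl
    simp only [List.dropWhile_cons, hds]
    simp only [Bool.false_eq_true, if_false]
    rw [← he, List.reverse_reverse]

theorem strip_idem (l : List Char) :
    PySem.Chars.strip (PySem.Chars.strip l) = PySem.Chars.strip l := by
  rcases he : PySem.Chars.strip l with _ | ⟨c, cs⟩
  · simp [PySem.Chars.strip, PySem.Chars.lstrip, PySem.Chars.rstrip]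
  · have hne : c :: cs ≠ ([] : List Char) := by simp
    refine strip_fixed _ hne ?_ ?_
    · simpa using strip_head_not_space l c cs he
    · have hdec : c :: cs = (c :: cs).dropLast ++ [(c :: cs).getLast hne] :=
        (List.dropLast_append_getLast hne).symm
      exact strip_last_not_space l _ _ (he.trans hdec)

-- strip is a no-op on `a ++ ' ' :: b` when a starts and b ends with non-whitespace
theorem strip_noop (a b : List Char) (c d : Char)
    (hha : a.head? = some c) (hc : PySem.Chars.isspace c = false)
    (hgb : b.getLast? = some d) (hd : PySem.Chars.isspace d = false) :
    PySem.Chars.strip (a ++ ' ' :: b) = a ++ ' ' :: b := by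
  have ha : a ≠ [] := by intro h; subst h; simp at hha
  have hb : b ≠ [] := by intro h; subst h; simp at hgb
  have hne : a ++ ' ' :: b ≠ [] := by simp [ha]
  refine strip_fixed _ hne ?_ ?_
  · rw [List.head_append_of_ne_nil ha]
    have h1 : a.head? = some (a.head ha) := List.head?_eq_some_head ha
    rw [hha] at h1
    rw [← Option.some_inj.mp h1]
    exact hc
  · have hne2 : (' ' :: b : List Char) ≠ [] := by simp
    have h1 : (a ++ ' ' :: b).getLast hne = (' ' :: b).getLast hne2 :=
      List.getLast_append_of_ne_nil hne hne2
    rw [h1, List.getLast_cons hb]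
    have h2 : b.getLast? = some (b.getLast hb) := List.getLast?_eq_some_getLast hb
    rw [hgb] at h2
    rw [← Option.some_inj.mp h2]
    exact hd

-- "cleaned" fragment: a fixed point of strip, and nonempty
def Cleaned (s : String) : Prop := PySem.Chars.strip s.toList = s.toList ∧ s ≠ ""

theorem toList_ne_nil (t : String) (h : t ≠ "") : t.toList ≠ [] := by
  intro hnil
  exact h (by
    have := congrArg String.ofList hnil
    simpa using this)

theorem ofList_toList_concat (t f : String) :
    (t ++ " " ++ f).toList = t.toList ++ ' ' :: f.toList := by
  simp

theorem str_strip_eq_self (s : String) (h : PySem.Chars.strip s.toList = s.toList) :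
    PySem.Str.strip s = s := by
  apply String.toList_inj.mp
  rw [PySem.Str.toList_strip, h]

theorem cleaned_strip (s : String) (h : PySem.Str.strip s ≠ "") : Cleaned (PySem.Str.strip s) := by
  constructor
  · rw [PySem.Str.toList_strip]
    exact strip_idem s.toList
  · exact h

-- the joined sentence is again cleaned, and strip is a no-op on it
theorem cleaned_concat (t f : String) (ht : Cleaned t) (hf : Cleaned f) :
    PySem.Chars.strip (t ++ " " ++ f).toList = (t ++ " " ++ f).toList := by
  obtain ⟨hst, htne⟩ := ht
  obtain ⟨hsf, hfne⟩ := hf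
  have htl : t.toList ≠ [] := toList_ne_nil t htne
  have hfl : f.toList ≠ [] := toList_ne_nil f hfne
  rcases hht : t.toList.head? with _ | c
  · exact absurd (List.head?_eq_none_iff.mp hht) htl
  obtain ⟨rest, hrest⟩ := List.head?_eq_some_iff.mp hht
  have hc : PySem.Chars.isspace c = false :=
    strip_head_not_space t.toList c rest (by rw [hst, hrest])
  rcases hgl : f.toList.getLast? with _ | d
  · exact absurd (List.getLast?_eq_none_iff.mp hgl) hfl
  have hd : PySem.Chars.isspace d = false :=
    strip_last_not_space f.toList d _ (by rw [hsf, List.dropLast_append_getLast? d hgl])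
  rw [ofList_toList_concat]
  exact strip_noop _ _ c d hht hc hgl hd

theorem concat_ne_empty (t f : String) : t ++ " " ++ f ≠ "" := by
  intro hcon
  have := congrArg String.toList hcon
  rw [ofList_toList_concat] at this
  simp at this

-- word counts add across the single joining space
theorem wc_concat (t f : String) :
    (PySem.Str.split₀ (t ++ " " ++ f)).length =
      (PySem.Str.split₀ t).length + (PySem.Str.split₀ f).length := by
  simp only [PySem.Str.split₀, List.length_map]
  rw [ofList_toList_concat, split₀_append_space, List.length_append]

-- a two-char suffix of `a ++ ' ' :: b` is read off b alone (plus the joining space when |b| = 1)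
theorem endswith2_concat (a b : List Char) (c : Char) (hb : b ≠ []) :
    PySem.Chars.endswith (a ++ ' ' :: b) [' ', c] =
      (PySem.Chars.endswith b [' ', c] || b == [c]) := by
  rcases hr : b.reverse with _ | ⟨d, bs⟩
  · exact absurd (by simpa using congrArg List.reverse hr) hb
  have hrev : (a ++ ' ' :: b).reverse = d :: (bs ++ ' ' :: a.reverse) := by
    rw [List.reverse_append]
    simp [hr]
  have hbval : b = (d :: bs).reverse := by
    have := congrArg List.reverse hr
    simpa using this
  apply Bool.eq_iff_iff.mpr
  simp only [Bool.or_eq_true, PySem.Chars.endswith_iff, beq_iff_eq]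
  rw [← List.reverse_prefix (l₁ := [' ', c]) (l₂ := a ++ ' ' :: b),
      ← List.reverse_prefix (l₁ := [' ', c]) (l₂ := b)]
  rw [hrev, hr]
  simp only [List.reverse_cons, List.reverse_nil, List.nil_append, List.cons_append]
  rcases bs with _ | ⟨e, bs'⟩
  · subst hbval
    simp [List.cons_prefix_cons, eq_comm]
  · subst hbval
    simp only [List.cons_append, List.cons_prefix_cons, List.nil_prefix, and_true]
    constructor
    · exact fun h => Or.inl h
    · rintro (h | hcon)
      · exact h
      · have := congrArg List.length hcon
        simp at this

theorem str_eq_iff_toList (s : String) (l : List Char) : (s == String.ofList l) = (s.toList == l) := by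
  rcases h : s.toList == l with _ | _
  · apply beq_eq_false_iff_ne.mpr
    intro hcon
    have := beq_eq_false_iff_ne.mp h
    exact this (by rw [hcon]; simp)
  · have := (beq_iff_eq).mp h
    apply beq_iff_eq.mpr
    apply String.toList_inj.mp
    simp [this]

-- the trailing-end flag of the joined sentence is B's incremental update
theorem tailFlag_concat (t f : String) (hf : f ≠ "") :
    bTailFlag (t ++ " " ++ f) = (bTailFlag f || (f == "." || f == ":" || f == ";")) := by
  have hfl : f.toList ≠ [] := toList_ne_nil f hf
  have h1 : ∀ c : Char, PySem.Str.endswith (t ++ " " ++ f) (String.ofList [' ', c]) =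
      (PySem.Str.endswith f (String.ofList [' ', c]) || (f == String.ofList [c])) := by
    intro c
    rw [PySem.Str.endswith_eq, PySem.Str.endswith_eq, ofList_toList_concat]
    rw [show (String.ofList [' ', c]).toList = [' ', c] from by simp]
    rw [endswith2_concat t.toList f.toList c hfl]
    rw [str_eq_iff_toList]
  have hdot := h1 '.'
  have hcol := h1 ':'
  have hsem := h1 ';'
  unfold bTailFlag
  rw [show (" ." : String) = String.ofList [' ', '.'] from by rfl,
      show (" :" : String) = String.ofList [' ', ':'] from by rfl,
      show (" ;" : String) = String.ofList [' ', ';'] from by rfl,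
      show ("." : String) = String.ofList ['.'] from by rfl,
      show (":" : String) = String.ofList [':'] from by rfl,
      show (";" : String) = String.ofList [';'] from by rfl,
      hdot, hcol, hsem]
  cases PySem.Str.endswith f (String.ofList [' ', '.']) <;>
    cases PySem.Str.endswith f (String.ofList [' ', ':']) <;>
      cases PySem.Str.endswith f (String.ofList [' ', ';']) <;>
        cases hq1 : (f == String.ofList ['.']) <;>
          cases hq2 : (f == String.ofList [':']) <;>
            cases hq3 : (f == String.ofList [';']) <;> simp_all

-- join lemmas at the String level
theorem str_join_singleton (t : String) : PySem.Str.join " " [t] = t := by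
  apply String.toList_inj.mp
  rw [PySem.Str.toList_join]
  simp [PySem.Chars.join_singleton]

theorem str_join_merge (t f : String) (g : List String) :
    PySem.Str.join " " (t :: f :: g) = PySem.Str.join " " ((t ++ " " ++ f) :: g) := by
  apply String.toList_inj.mp
  rw [PySem.Str.toList_join, PySem.Str.toList_join]
  rcases g with _ | ⟨q, rest⟩
  · simp only [List.map_cons, List.map_nil, ofList_toList_concat]
    rw [PySem.Chars.join_cons_cons, PySem.Chars.join_singleton, PySem.Chars.join_singleton]
    simp
  · simp only [List.map_cons, ofList_toList_concat]
    rw [PySem.Chars.join_cons_cons, PySem.Chars.join_cons_cons, PySem.Chars.join_cons_cons]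
    simp

-- folding A's step over the raw fragments equals folding it over the cleaned fragments
theorem foldl_cleaned (fragments : List String) (m : List String) :
    fragments.foldl pyAStep m =
      ((fragments.map PySem.Str.strip).filter (fun s => !(s == ""))).foldl pyAStep m := by
  induction fragments generalizing m with
  | nil => rfl
  | cons f rest ih =>
    simp only [List.foldl_cons, List.map_cons, List.filter_cons]
    by_cases hf : PySem.Str.strip f == ""
    · have hstep : pyAStep m f = m := by
        unfold pyAStep
        simp [hf]
      simp only [hf, Bool.not_true, Bool.false_eq_true, if_false, hstep]
      exact ih m
    · have hstep : pyAStep m (PySem.Str.strip f) = pyAStep m f := by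
        unfold pyAStep
        rw [str_strip_eq_self (PySem.Str.strip f) (by rw [PySem.Str.toList_strip]; exact strip_idem f.toList)]
      simp only [hf, Bool.not_false, if_true, List.foldl_cons, hstep]
      exact ih _

-- everything surviving the clean-up pass is Cleaned
theorem cleaned_all (fragments : List String) :
    ∀ s ∈ (fragments.map PySem.Str.strip).filter (fun s => !(s == "")), Cleaned s := by
  intro s hs
  rw [List.mem_filter] at hs
  obtain ⟨hmem, hne⟩ := hs
  rw [List.mem_map] at hmem
  obtain ⟨x, _, hx⟩ := hmem
  subst hx
  exact cleaned_strip x (by simpa using hne)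

-- the main invariant: A's fold from `done ++ [t]` is `done` plus B's grouping continued from t
theorem main_inv (L : List String) (done : List String) (t : String)
    (hL : ∀ s ∈ L, Cleaned s) (ht : Cleaned t) :
    L.foldl pyAStep (done ++ [t]) =
      done ++ (PySem.Str.join " "
          (t :: (bConsume L (PySem.Str.split₀ t).length (bTailFlag t)).1)
        :: bOuter (bConsume L (PySem.Str.split₀ t).length (bTailFlag t)).2) := by
  induction L generalizing done t with
  | nil =>
    simp [bConsume, bOuter, str_join_singleton]
  | cons f L' ih =>
    have hf : Cleaned f := hL f (by simp)
    have hL' : ∀ s ∈ L', Cleaned s := fun s hs => hL s (by simp [hs])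
    have hfs : PySem.Str.strip f = f := str_strip_eq_self f hf.1
    have hfne : (f == "") = false := beq_eq_false_iff_ne.mpr hf.2
    have hmne : (done ++ [t]).isEmpty = false := by simp
    have hlast : (done ++ [t]).getLast! = t := by
      rw [List.getLast!_eq_getLast?_getD]; simp
    simp only [List.foldl_cons]
    rw [show pyAStep (done ++ [t]) f =
        (if (decide ((PySem.Str.split₀ t).length < 4) ||
              (PySem.Str.endswith t " ." || PySem.Str.endswith t " :" || PySem.Str.endswith t " ;"))
            && pyStrIslower (PySem.Str.slice f none (some 1)) then
          done ++ [PySem.Str.strip (t ++ " " ++ f)]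
        else (done ++ [t]) ++ [f]) from by
      unfold pyAStep
      rw [hfs]
      simp only [hfne, Bool.false_eq_true, if_false, hmne, hlast]
      split_ifs <;> simp]
    unfold bConsume
    simp only [show ((decide ((PySem.Str.split₀ t).length < 4) || bTailFlag t)
        && pyStrIslower (PySem.Str.slice f none (some 1)))
      = ((decide ((PySem.Str.split₀ t).length < 4) ||
            (PySem.Str.endswith t " ." || PySem.Str.endswith t " :" || PySem.Str.endswith t " ;"))
          && pyStrIslower (PySem.Str.slice f none (some 1))) from by rw [bTailFlag]]
    split_ifs with hcond
    · -- merge: continue the group with t' = t ++ " " ++ f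
      have hstripnoop : PySem.Str.strip (t ++ " " ++ f) = t ++ " " ++ f :=
        str_strip_eq_self _ (cleaned_concat t f ht hf)
    -- the bConsume state after consuming f equals the state computed from t'
      have ht' : Cleaned (t ++ " " ++ f) := ⟨cleaned_concat t f ht hf, concat_ne_empty t f⟩
      rw [hstripnoop, ih done (t ++ " " ++ f) hL' ht']
      rw [wc_concat t f, tailFlag_concat t f hf.2]
      rw [str_join_merge]
    · -- new sentence: t is finished, restart from f
      rw [ih (done ++ [t]) f hL' hf]
      rw [str_join_singleton]
      rw [show bOuter (f :: L') =
          PySem.Str.join " " (f :: (bConsume L' (PySem.Str.split₀ f).length (bTailFlag f)).1)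
            :: bOuter (bConsume L' (PySem.Str.split₀ f).length (bTailFlag f)).2 from by
        rw [bOuter]]
      simp

-- ===== VERDICT (by name: the statement is the Claim_ definition above) =====
theorem merge_sentence_fragments_py_spec : Claim_equal_merge_sentence_fragments_py := by
  intro fragments _
  unfold Spec_merge_sentence_fragments_py merge_sentence_fragments_py merge_sentence_fragments_py_alt
  rcases hfr : fragments with _ | ⟨f0, fs⟩
  · simp [bOuter]
  rw [if_neg (by simp)]
  rw [foldl_cleaned]
  rcases hcl : (((f0 :: fs).map PySem.Str.strip).filter (fun s => !(s == ""))) with _ | ⟨g, L⟩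
  · simp [bOuter]
  have hall : ∀ s ∈ g :: L, Cleaned s := by
    rw [← hcl]; exact cleaned_all (f0 :: fs)
  have hg : Cleaned g := hall g (by simp)
  have hstep : pyAStep [] g = [] ++ [g] := by
    unfold pyAStep
    rw [str_strip_eq_self g hg.1]
    simp [beq_eq_false_iff_ne.mpr hg.2]
  simp only [List.foldl_cons, hstep]
  rw [main_inv L [] g (fun s hs => hall s (by simp [hs])) hg]
  rw [show bOuter (g :: L) =
      PySem.Str.join " " (g :: (bConsume L (PySem.Str.split₀ g).length (bTailFlag g)).1)
        :: bOuter (bConsume L (PySem.Str.split₀ g).length (bTailFlag g)).2 from by rw [bOuter]]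
  simp
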